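-- pv_equiv track=rewrite | github.com/csking101/Soup | soup_cli/commands/data.py | _sample_hard
-- ===== SOURCE A (Python) =====
-- def _sample_hard(data: list[dict], num: int) -> list[dict]:
--     """Sample hardest examples by text length (proxy for complexity).
--
--     Longer texts tend to be more complex / challenging.
--     """
--     num = min(num, len(data))
--     if num >= len(data):
--         return list(data)
--
--     # Score by total text length (proxy for difficulty)
--     scored = []
--     for row in data:
--         text_len = sum(len(str(val)) for val in row.values() if val)
--         scored.append((text_len, row))
--
--     # Sort by length descending, take top N
--     scored.sort(key=lambda pair: pair[0], reverse=True)
--     return [row for _, row in scored[:num]]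
-- ===== SOURCE B (Python) =====
-- def _sample_hard(data: list[dict], num: int) -> list[dict]:
--     """Sample hardest examples by text length (proxy for complexity).
--
--     Instead of sorting the whole list, repeatedly extract the current
--     hardest row (partial selection, num linear scans): max() returns the
--     first maximal pair, which reproduces the stable descending tie order.
--     """
--     num = min(num, len(data))
--     if num >= len(data):
--         return list(data)
--
--     scored = [(sum(len(str(val)) for val in row.values() if val), row) for row in data]
--     result = []
--     for _ in range(num):
--         best = max(scored, key=lambda pair: pair[0])
--         result.append(best[1])
--         scored.remove(best)
--     return result
-- ===== Notes on version B (the rewrite author's own statement) =====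
-- stated objective: alternative
-- what changed: Replaces the full stable sort plus slice with repeated extraction of the current hardest row: num linear max-scans (max() returns the first maximal pair, reproducing the stable tie order), removing each selected pair; no sort at all.
-- intended difference: For num < 0 with len(data)+num > 0, A's negative slice scored[:num] accidentally returns the len(data)+num hardest rows, while B returns [], the intended result of sampling a non-positive number of rows. — e.g. on _sample_hard([[("a", "bb")], [("a", "b")]], -1): A returns [[("a", "bb")]], B returns []
import Mathlib
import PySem

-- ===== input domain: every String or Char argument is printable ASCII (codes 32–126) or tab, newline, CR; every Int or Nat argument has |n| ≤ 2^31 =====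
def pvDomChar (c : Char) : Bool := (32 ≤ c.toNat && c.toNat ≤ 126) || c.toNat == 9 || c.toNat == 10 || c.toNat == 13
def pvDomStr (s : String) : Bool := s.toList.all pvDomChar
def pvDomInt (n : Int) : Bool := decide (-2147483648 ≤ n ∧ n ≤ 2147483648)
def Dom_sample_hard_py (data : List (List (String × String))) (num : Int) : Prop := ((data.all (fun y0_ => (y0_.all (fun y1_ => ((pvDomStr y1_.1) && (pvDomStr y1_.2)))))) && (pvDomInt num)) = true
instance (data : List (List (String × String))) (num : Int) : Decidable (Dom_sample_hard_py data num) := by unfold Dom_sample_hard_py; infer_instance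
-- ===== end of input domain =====

-- B replaces A's full stable sort + slice by repeated extraction of the current hardest
-- row (partial selection: num linear max-scans, no sort). Objective: alternative.
-- For num < 0 (with 0 < len(data)+num) A's slice accidentally returns all but the last
-- |num| sorted rows; B returns [] there (stated as the intended difference D_ below).

-- shared helper: text_len = sum(len(str(val)) for val in row.values() if val)
-- (identical line in both Pythons; values are str here so str(val) = val, 'if val' = nonempty)
def pvTextLen (row : List (String × String)) : Int :=
  ((((PySem.Dict.mk row).values).filter (fun v => !(v == ""))).map (fun v => PySem.Str.len v)).sum

-- ===== PORT A =====
def sample_hard_py (data : List (List (String × String))) (num : Int) : List (List (String × String)) :=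
  let num := min num (data.length : Int)
  if (data.length : Int) ≤ num then data
  else
    -- scored = []; for row in data: scored.append((text_len, row))
    let scored := data.foldl (fun acc row => acc ++ [(pvTextLen row, row)]) []
    -- scored.sort(key=lambda pair: pair[0], reverse=True)
    let scored := PySem.List.sorted scored (fun p => p.1) true
    -- [row for _, row in scored[:num]]
    (PySem.List.slice scored none (some num)).map (fun p => p.2)

-- ===== PORT B =====
-- for _ in range(num): best = max(scored, key=...); result.append(best[1]); scored.remove(best)
-- (the two 'none' branches are unreachable guards: the loop runs num < len(data) times,
--  so scored is never empty and best is always a member)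
def pvSelLoop (n : Nat) (scored : List (Int × List (String × String))) : List (List (String × String)) :=
  match n with
  | 0 => []
  | Nat.succ n =>
    match PySem.List.max? scored (fun p => p.1) with
    | none => []
    | some best =>
      match PySem.List.remove? scored best with
      | none => []
      | some rest => best.2 :: pvSelLoop n rest

def sample_hard_py_alt (data : List (List (String × String))) (num : Int) : List (List (String × String)) :=
  let num := min num (data.length : Int)
  if (data.length : Int) ≤ num then data
  else
    let scored := data.map (fun row => (pvTextLen row, row))
    -- range(num) is empty for num ≤ 0, hence num.toNat iterations
    pvSelLoop num.toNat scored

-- ===== PRECONDITION & SPEC =====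
-- For num < 0 with 0 < data.length + num, A returns the data.length+num hardest rows
-- (an accident of Python's negative slice scored[:num]); B returns [] there, the
-- intended result of sampling a non-positive number of rows.
def D_sample_hard_py (data : List (List (String × String))) (num : Int) : Prop :=
  num < 0 ∧ 0 < (data.length : Int) + num
instance (data : List (List (String × String))) (num : Int) : Decidable (D_sample_hard_py data num) := by unfold D_sample_hard_py; infer_instance

def Spec_sample_hard_py (data : List (List (String × String))) (num : Int) (out : List (List (String × String))) : Prop := ¬ D_sample_hard_py data num → out = sample_hard_py_alt data num
instance (data : List (List (String × String))) (num : Int) (out : List (List (String × String))) : Decidable (Spec_sample_hard_py data num out) := by unfold Spec_sample_hard_py; infer_instance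

def pvDiffWitness_sample_hard_py : (List (List (String × String))) × Int := ([[("a", "bb")], [("a", "b")]], -1)
def pvDiffWitnessOut_sample_hard_py : (List (List (String × String))) × (List (List (String × String))) := ([[("a", "bb")]], [])

-- ===== CLAIM (what is proved, stated in full; the proofs are below) =====
def Claim_unchanged_sample_hard_py : Prop := ∀ (data : List (List (String × String))) (num : Int), Dom_sample_hard_py data num → Spec_sample_hard_py data num (sample_hard_py data num)
def Claim_changed_sample_hard_py : Prop := Dom_sample_hard_py (pvDiffWitness_sample_hard_py.1) (pvDiffWitness_sample_hard_py.2) ∧ D_sample_hard_py (pvDiffWitness_sample_hard_py.1) (pvDiffWitness_sample_hard_py.2) ∧ sample_hard_py (pvDiffWitness_sample_hard_py.1) (pvDiffWitness_sample_hard_py.2) = pvDiffWitnessOut_sample_hard_py.1 ∧ sample_hard_py_alt (pvDiffWitness_sample_hard_py.1) (pvDiffWitness_sample_hard_py.2) = pvDiffWitnessOut_sample_hard_py.2 ∧ pvDiffWitnessOut_sample_hard_py.1 ≠ pvDiffWitnessOut_sample_hard_py.2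
def Claim_exact_sample_hard_py : Prop := ∀ (data : List (List (String × String))) (num : Int), Dom_sample_hard_py data num → D_sample_hard_py data num → sample_hard_py data num ≠ sample_hard_py_alt data num

-- ===== LEMMAS AND PROOFS =====

-- max? over a snoc is one more step of its fold
lemma pv_max?_append {α κ : Type} [LinearOrder κ] (l : List α) (x : α) (key : α → κ) :
    PySem.List.max? (l ++ [x]) key =
      match PySem.List.max? l key with
      | none => some x
      | some m => if key m < key x then some x else some m := by
  rw [PySem.List.max?, List.foldl_append]
  rfl

-- stable extraction: a stable descending sort starts with the FIRST maximal element
-- (exactly max?'s result), followed by the stable sort of the list with it erased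
lemma pv_sorted_rev_extract {α κ : Type} [BEq α] [LawfulBEq α] [LinearOrder κ] (key : α → κ) :
    ∀ (l : List α) (m : α), PySem.List.max? l key = some m →
      PySem.List.sorted l key true = m :: PySem.List.sorted (l.erase m) key true := by
  intro l
  induction l using List.reverseRecOn with
  | nil => intro m hm; simp [PySem.List.max?] at hm
  | append_singleton l x ih =>
    intro m hm
    rw [pv_max?_append] at hm
    have hsnoc : ∀ (t : List α), PySem.List.sorted (t ++ [x]) key true =
        PySem.List.insertBy (fun a b => decide (key b < key a)) x (PySem.List.sorted t key true) := by
      intro t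
      rw [PySem.List.sorted_rev_eq_foldl_insertBy, PySem.List.sorted_rev_eq_foldl_insertBy,
          List.foldl_append]
      rfl
    cases hl : PySem.List.max? l key with
    | none =>
      have : l = [] := (PySem.List.max?_eq_none_iff l key).mp hl
      subst this
      rw [hl] at hm
      simp only [Option.some.injEq] at hm
      subst hm
      simp [PySem.List.sorted, PySem.List.insertBy]
    | some m0 =>
      rw [hl] at hm
      simp only at hm
      by_cases hlt : key m0 < key x
      · -- x is a strictly new maximum: it heads the sort and is absent from l
        rw [if_pos hlt] at hm
        simp only [Option.some.injEq] at hm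
        subst hm
        have hxl : x ∉ l := by
          intro hmem
          have := PySem.List.max?_isMax hl x hmem
          exact absurd hlt (not_lt.mpr this)
        rw [List.erase_append_right _ hxl]
        simp only [List.erase_cons_head]
        rw [hsnoc l]
        cases hs : PySem.List.sorted l key true with
        | nil => simp [PySem.List.insertBy, hs]
        | cons h t =>
          have hh : h ∈ l := (PySem.List.mem_sorted l key true h).mp (hs ▸ List.mem_cons_self)
          have : key h < key x := lt_of_le_of_lt (PySem.List.max?_isMax hl h hh) hlt
          simp [PySem.List.insertBy, this, hs]
      · -- the maximum stays in l : insert x behind it and use the IH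
        rw [if_neg hlt] at hm
        simp only [Option.some.injEq] at hm
        subst hm
        have hml : m0 ∈ l := PySem.List.max?_mem hl
        rw [List.erase_append_left _ hml, hsnoc l, ih m0 hl, hsnoc (l.erase m0)]
        simp [PySem.List.insertBy, not_lt_of_ge (not_lt.mp hlt)]

-- the selection loop computes the rows of the first n entries of the stable descending sort
lemma pv_selLoop_eq (n : Nat) :
    ∀ (l : List (Int × List (String × String))), n ≤ l.length →
      pvSelLoop n l = ((PySem.List.sorted l (fun p => p.1) true).take n).map (fun p => p.2) := by
  induction n with
  | zero => intro l _; simp [pvSelLoop]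
  | succ n ih =>
    intro l hn
    have hne : l ≠ [] := by intro h; subst h; simp at hn
    cases hm : PySem.List.max? l (fun p => p.1) with
    | none => exact absurd ((PySem.List.max?_eq_none_iff _ _).mp hm) hne
    | some m =>
      have hml : m ∈ l := PySem.List.max?_mem hm
      have hrem := PySem.List.remove?_eq_some_erase l m hml
      have hlen : n ≤ (l.erase m).length := by
        rw [List.length_erase_of_mem hml]; omega
      rw [pv_sorted_rev_extract (fun p => p.1) l m hm]
      simp only [pvSelLoop, hm, hrem, List.take_succ_cons, List.map_cons]
      rw [ih (l.erase m) hlen]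

-- A's appended score list is the mapped score list
lemma pv_scored_eq (data : List (List (String × String))) :
    data.foldl (fun acc row => acc ++ [(pvTextLen row, row)]) [] =
      data.map (fun row => (pvTextLen row, row)) := by
  rw [PySem.List.foldl_append_singleton_eq_map (fun row => (pvTextLen row, row)) data []]
  simp

theorem sample_hard_py_spec : Claim_unchanged_sample_hard_py := by
  intro data num _ hnd
  show sample_hard_py data num = sample_hard_py_alt data num
  unfold sample_hard_py sample_hard_py_alt
  by_cases hcl : (data.length : Int) ≤ min num (data.length : Int)
  · simp [hcl]
  · simp only [hcl, if_false, pv_scored_eq]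
    set L := data.map (fun row => (pvTextLen row, row)) with hL
    have hLlen : L.length = data.length := by simp [hL]
    have hnum : min num (data.length : Int) = num := by omega
    rw [hnum]
    unfold D_sample_hard_py at hnd
    push Not at hnd
    by_cases h0 : 0 ≤ num
    · -- scored[:num] is take num.toNat; the selection loop computes exactly that
      rw [PySem.List.slice_to _ h0]
      have hle : num.toNat ≤ L.length := by omega
      rw [pv_selLoop_eq num.toNat L hle]
    · -- num < 0 and len + num ≤ 0 : both sides are empty
      have hneg : num < 0 := by omega
      have hlen0 : (data.length : Int) + num ≤ 0 := hnd hneg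
      have htn : num.toNat = 0 := by omega
      rw [htn]
      have : PySem.List.slice (PySem.List.sorted L (fun p => p.1) true) none (some num) = [] := by
        have hslen : (PySem.List.sorted L (fun p => p.1) true).length = data.length := by
          rw [PySem.List.length_sorted]; exact hLlen
        simp only [PySem.List.slice, PySem.List.clampIdx, hslen]
        split_ifs <;> simp_all
      rw [this]
      simp [pvSelLoop]

theorem sample_hard_py_changed : Claim_changed_sample_hard_py := by
  unfold Claim_changed_sample_hard_py; decide

theorem sample_hard_py_tight : Claim_exact_sample_hard_py := by
  intro data num _ hd
  obtain ⟨hneg, hpos⟩ := hd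
  have hlen1 : 1 ≤ data.length := by omega
  unfold sample_hard_py sample_hard_py_alt
  have hnum : min num (data.length : Int) = num := by omega
  have hcond : ¬ ((data.length : Int) ≤ num) := by omega
  simp only [hnum, if_neg hcond]
  have htn : num.toNat = 0 := by omega
  rw [htn]
  -- B is []; A keeps the first data.length + num > 0 sorted rows, hence is nonempty
  intro hEq
  have hB : pvSelLoop 0 (data.map fun row => (pvTextLen row, row)) = [] := by simp [pvSelLoop]
  rw [hB] at hEq
  have hAlen : (PySem.List.slice
      (PySem.List.sorted (data.foldl (fun acc row => acc ++ [(pvTextLen row, row)]) [])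
        (fun p => p.1) true) none (some num)).length ≠ 0 := by
    have hslen : (PySem.List.sorted (data.foldl (fun acc row => acc ++ [(pvTextLen row, row)]) [])
        (fun p => p.1) true).length = data.length := by
      rw [PySem.List.length_sorted, pv_scored_eq]; simp
    simp only [PySem.List.slice, PySem.List.clampIdx, hslen, List.length_take, List.length_drop]
    split_ifs <;> simp_all <;> omega
  exact hAlen (by simpa using congrArg List.length hEq)
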